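-- pv_equiv track=rewrite | github.com/Jashwanth-k/Data-Structures-and-Algorithms | 1.Recorsions - 1/checkAB in a string.py | checkAB
-- ===== SOURCE A (Python) =====
-- def checkAB(s):
--     if len(s) == 0:
--         return True
--     elif len(s) == 1:
--         if s == 'a':
--             return True
--         else:
--             return False
--     elif s[0] == 'a':
--         return checkAB(s[1:])
--     elif s[0] == 'b':
--         if s[1] == 'b':
--             return checkAB(s[2:])
--         else:
--             return False
--     else:
--         return False
-- ===== SOURCE B (Python) =====
-- def checkAB(s):
--     # single linear pass: track parity of the current run of 'b's
--     odd = False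
--     for c in s:
--         if c == 'b':
--             odd = not odd
--         elif c == 'a':
--             if odd:
--                 return False
--         else:
--             return False
--     return not odd
-- ===== Notes on version B (the rewrite author's own statement) =====
-- stated objective: faster
-- what changed: Replaced the recursion with O(n) string slicing per step by a single linear scan tracking the parity of the current run of 'b's, with no slicing or recursion.
import Mathlib
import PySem

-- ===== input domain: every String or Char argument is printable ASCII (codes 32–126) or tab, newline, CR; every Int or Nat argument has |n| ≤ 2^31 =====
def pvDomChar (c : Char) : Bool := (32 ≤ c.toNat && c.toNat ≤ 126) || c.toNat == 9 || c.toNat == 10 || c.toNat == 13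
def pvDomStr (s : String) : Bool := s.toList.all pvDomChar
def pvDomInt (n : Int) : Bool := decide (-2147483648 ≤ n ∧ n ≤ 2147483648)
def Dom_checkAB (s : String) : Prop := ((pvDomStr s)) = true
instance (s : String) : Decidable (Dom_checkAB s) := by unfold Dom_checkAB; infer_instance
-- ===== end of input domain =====

-- B: single linear pass tracking parity of the current 'b' run, instead of A's recursion with slicing (faster: no per-step slice).
-- ===== PORT A =====
-- literal transliteration of A's recursion on the character list: len 0 / len 1 / two-char lookahead
def checkABList : List Char → Bool
  | [] => true
  | [c] => c == 'a'
  | c :: d :: rest =>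
    if c == 'a' then checkABList (d :: rest)
    else if c == 'b' then
      if d == 'b' then checkABList rest else false
    else false

def checkAB (s : String) : Bool := checkABList s.toList

-- ===== PORT B =====
-- step of B's loop: Option Bool state, none = early `return False`, some odd = parity of current b-run
def abStep : Option Bool → Char → Option Bool
  | none, _ => none
  | some odd, c =>
    if c == 'b' then some (!odd)
    else if c == 'a' then (if odd then none else some false)
    else none

def checkAB_alt (s : String) : Bool :=
  match s.toList.foldl abStep (some false) with
  | some odd => !odd
  | none => false

-- ===== PRECONDITION & SPEC =====
def Spec_checkAB (s : String) (out : Bool) : Prop := out = checkAB_alt s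
instance (s : String) (out : Bool) : Decidable (Spec_checkAB s out) := by unfold Spec_checkAB; infer_instance

-- ===== CLAIM (what is proved, stated in full; the proofs are below) =====
def Claim_equal_checkAB : Prop := ∀ (s : String), Dom_checkAB s → Spec_checkAB s (checkAB s)

-- ===== LEMMAS AND PROOFS =====

-- ===== VERDICT (by name: the statement is the Claim_ definition above) =====
theorem abStep_none (l : List Char) : l.foldl abStep none = none := by
  induction l with
  | nil => rfl
  | cons c l ih => simpa [abStep] using ih

theorem checkABList_eq (l : List Char) :
    checkABList l = (match l.foldl abStep (some false) with
                     | some odd => !odd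
                     | none => false) := by
  induction l using checkABList.induct with
  | case1 => rfl
  | case2 c =>
    by_cases ha : c = 'a'
    · simp [checkABList, abStep, ha]
    · by_cases hb : c = 'b' <;> simp [checkABList, abStep, ha, hb]
  | case3 c d rest ha ih =>
    simp only [beq_iff_eq] at ha
    simpa [checkABList, abStep, ha] using ih
  | case4 c d rest ha hb hd ih =>
    simp only [beq_iff_eq] at ha hb hd
    simpa [checkABList, abStep, ha, hb, hd] using ih
  | case5 c d rest ha hb hd =>
    simp only [beq_iff_eq] at ha hb hd
    by_cases hda : d = 'a' <;>
      simp [checkABList, abStep, hb, hd, hda, abStep_none]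
  | case6 c d rest ha hb =>
    simp only [beq_iff_eq] at ha hb
    simp [checkABList, abStep, ha, hb, abStep_none]

theorem checkAB_spec : Claim_equal_checkAB := by
  intro s _
  unfold Spec_checkAB checkAB checkAB_alt
  exact checkABList_eq s.toList
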